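-- pv_equiv track=rewrite | github.com/pypi-data/pypi-mirror-261 | packages/xython/xython-2.2.3.tar.gz/xython-2.2.3/src/xython/pynal.py | make_time_set_from_hms_list_by_step
-- ===== SOURCE A (Python) =====
-- def make_time_set_from_hms_list_by_step(start_hms_list, step=30, cycle=20):
-- 	"""
-- 	시작과 종료시간을 입력하면, 30분간격으로 시간목록을 자동으로 생성시키는것
--
-- 	:param start_hms_list: [시, 분, 초]
-- 	:param step:
-- 	:param cycle:
-- 	:return:
-- 	"""
-- 	result = []
-- 	hour, min, sec = start_hms_list
-- 	result.append([hour, min, sec])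
-- 	for one in range(cycle):
-- 		min = min + step
-- 		over_min, min = divmod(min, 60)
-- 		if over_min > 0:
-- 			hour = hour + over_min
-- 		hour = divmod(hour, 24)[1]
-- 		result.append([hour, min, sec])
-- 	return result
-- ===== SOURCE B (Python) =====
-- def make_time_set_from_hms_list_by_step(start_hms_list, step=30, cycle=20):
--     hour, minute, sec = start_hms_list
--     tail = [[(hour + (minute + i * step) // 60) % 24, (minute + i * step) % 60, sec]
--             for i in range(1, cycle + 1)]
--     return [[hour, minute, sec]] + tail
-- ===== Notes on version B (the rewrite author's own statement) =====
-- stated objective: simpler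
-- what changed: Replaces A's per-iteration mutable (hour,min) state with divmod-carry by a per-index closed form ((minute + i*step) // 60 and % 60) in a single comprehension; Pre_ excludes lists of length != 3 (A raises ValueError) and negative step, which is outside the function's natural forward-stepping purpose (there A's positive-only carry guard never decrements the hour).
-- intended difference: When the start minute plus one step is still negative (a negative start minute) and the dropped borrow is not a multiple of 24, A never borrows from the hour (its guard only adds positive carries) and returns an hour that is too large, while B applies the signed carry, the correct clock arithmetic. — e.g. on make_time_set_from_hms_list_by_step([5, -70, 0], 30, 1): A returns [[5, -70, 0], [5, 20, 0]], B returns [[5, -70, 0], [4, 20, 0]]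
import Mathlib
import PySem

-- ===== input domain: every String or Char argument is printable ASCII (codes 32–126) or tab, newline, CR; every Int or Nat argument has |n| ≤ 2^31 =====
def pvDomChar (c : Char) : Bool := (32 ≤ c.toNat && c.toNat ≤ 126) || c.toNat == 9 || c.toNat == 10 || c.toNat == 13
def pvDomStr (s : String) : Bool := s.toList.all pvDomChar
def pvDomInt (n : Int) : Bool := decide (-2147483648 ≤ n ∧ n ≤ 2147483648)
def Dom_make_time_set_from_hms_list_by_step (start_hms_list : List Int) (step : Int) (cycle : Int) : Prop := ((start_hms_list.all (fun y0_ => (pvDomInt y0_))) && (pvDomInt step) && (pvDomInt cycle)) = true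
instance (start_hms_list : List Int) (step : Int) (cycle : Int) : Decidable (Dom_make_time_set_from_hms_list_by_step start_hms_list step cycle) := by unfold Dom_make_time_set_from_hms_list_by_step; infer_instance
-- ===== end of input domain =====

-- B replaces A's per-iteration mutable carry state with a per-index closed form in one
-- comprehension (objective: simpler, same asymptotics); for a negative start minute whose
-- borrow A's positive-only carry guard drops, B returns the correct clock arithmetic (D_ below).

-- ===== PORT A =====
def make_time_set_from_hms_list_by_step (start_hms_list : List Int) (step : Int) (cycle : Int) : List (List Int) :=
  match start_hms_list with
  | [hour, min, sec] =>
    ((PySem.List.pyRange 0 cycle 1).foldl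
      (fun (st : List (List Int) × Int × Int) _one =>
        let min1 := st.2.2 + step
        let over_min := PySem.Int.floordiv min1 60
        let min2 := PySem.Int.mod min1 60
        let hour1 := if over_min > 0 then st.2.1 + over_min else st.2.1
        let hour2 := PySem.Int.mod hour1 24
        (st.1 ++ [[hour2, min2, sec]], hour2, min2))
      ([[hour, min, sec]], hour, min)).1
  | _ => []  -- unpacking raises ValueError in Python; outside Pre_

-- ===== PORT B =====
def make_time_set_from_hms_list_by_step_alt (start_hms_list : List Int) (step : Int) (cycle : Int) : List (List Int) :=
  -- unpacking a list of length ≠ 3 raises ValueError in Python; those inputs are outside Pre_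
  match start_hms_list with
  | [] => []
  | hour :: rest =>
    match rest with
    | [] => []
    | minute :: rest2 =>
      match rest2 with
      | [] => []
      | sec :: rest3 =>
        match rest3 with
        | _ :: _ => []
        | [] =>
          let tail := (PySem.List.pyRange 1 (cycle + 1) 1).map (fun i =>
            [PySem.Int.mod (hour + PySem.Int.floordiv (minute + i * step) 60) 24,
             PySem.Int.mod (minute + i * step) 60, sec])
          [[hour, minute, sec]] ++ tail

-- ===== PRECONDITION & SPEC =====
-- Pre_ excludes lists of length ≠ 3, on which Python A raises ValueError (unpacking), and
-- negative step, which is outside the function's natural forward-stepping domain (there A's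
-- positive-only carry guard never decrements the hour).
def Pre_make_time_set_from_hms_list_by_step (start_hms_list : List Int) (step : Int) (cycle : Int) : Prop :=
  start_hms_list.length = 3 ∧ 0 ≤ step
instance (start_hms_list : List Int) (step : Int) (cycle : Int) : Decidable (Pre_make_time_set_from_hms_list_by_step start_hms_list step cycle) := by unfold Pre_make_time_set_from_hms_list_by_step; infer_instance
def pvWitness_make_time_set_from_hms_list_by_step : List Int × Int × Int := ([9, 30, 0], 30, 5)

-- When the start minute plus one step is still negative (a negative start minute) and the
-- dropped borrow is not a multiple of 24, A never borrows from the hour (its guard only adds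
-- positive carries) and returns an hour that is too large; B applies the signed carry, the
-- correct clock arithmetic.
def D_make_time_set_from_hms_list_by_step (start_hms_list : List Int) (step : Int) (cycle : Int) : Prop :=
  0 ≤ step ∧ 1 ≤ cycle ∧ start_hms_list.getD 1 0 + step < 0 ∧
    PySem.Int.mod (PySem.Int.floordiv (start_hms_list.getD 1 0 + step) 60) 24 ≠ 0
instance (start_hms_list : List Int) (step : Int) (cycle : Int) : Decidable (D_make_time_set_from_hms_list_by_step start_hms_list step cycle) := by unfold D_make_time_set_from_hms_list_by_step; infer_instance

def Spec_make_time_set_from_hms_list_by_step (start_hms_list : List Int) (step : Int) (cycle : Int) (out : List (List Int)) : Prop := ¬ D_make_time_set_from_hms_list_by_step start_hms_list step cycle → out = make_time_set_from_hms_list_by_step_alt start_hms_list step cycle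
instance (start_hms_list : List Int) (step : Int) (cycle : Int) (out : List (List Int)) : Decidable (Spec_make_time_set_from_hms_list_by_step start_hms_list step cycle out) := by unfold Spec_make_time_set_from_hms_list_by_step; infer_instance

def pvDiffWitness_make_time_set_from_hms_list_by_step : List Int × Int × Int := ([5, -70, 0], 30, 1)
def pvDiffWitnessOut_make_time_set_from_hms_list_by_step : (List (List Int)) × (List (List Int)) :=
  ([[5, -70, 0], [5, 20, 0]], [[5, -70, 0], [4, 20, 0]])

-- ===== CLAIM =====
def Claim_unchanged_make_time_set_from_hms_list_by_step : Prop := ∀ (start_hms_list : List Int) (step : Int) (cycle : Int), Dom_make_time_set_from_hms_list_by_step start_hms_list step cycle → Pre_make_time_set_from_hms_list_by_step start_hms_list step cycle → Spec_make_time_set_from_hms_list_by_step start_hms_list step cycle (make_time_set_from_hms_list_by_step start_hms_list step cycle)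
def Claim_changed_make_time_set_from_hms_list_by_step : Prop := Dom_make_time_set_from_hms_list_by_step (pvDiffWitness_make_time_set_from_hms_list_by_step.1) (pvDiffWitness_make_time_set_from_hms_list_by_step.2.1) (pvDiffWitness_make_time_set_from_hms_list_by_step.2.2) ∧ Pre_make_time_set_from_hms_list_by_step (pvDiffWitness_make_time_set_from_hms_list_by_step.1) (pvDiffWitness_make_time_set_from_hms_list_by_step.2.1) (pvDiffWitness_make_time_set_from_hms_list_by_step.2.2) ∧ D_make_time_set_from_hms_list_by_step (pvDiffWitness_make_time_set_from_hms_list_by_step.1) (pvDiffWitness_make_time_set_from_hms_list_by_step.2.1) (pvDiffWitness_make_time_set_from_hms_list_by_step.2.2) ∧ make_time_set_from_hms_list_by_step (pvDiffWitness_make_time_set_from_hms_list_by_step.1) (pvDiffWitness_make_time_set_from_hms_list_by_step.2.1) (pvDiffWitness_make_time_set_from_hms_list_by_step.2.2) = pvDiffWitnessOut_make_time_set_from_hms_list_by_step.1 ∧ make_time_set_from_hms_list_by_step_alt (pvDiffWitness_make_time_set_from_hms_list_by_step.1) (pvDiffWitness_make_time_set_from_hms_list_by_step.2.1) (pvDiffWitness_make_time_set_from_hms_list_by_step.2.2)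 = pvDiffWitnessOut_make_time_set_from_hms_list_by_step.2 ∧ pvDiffWitnessOut_make_time_set_from_hms_list_by_step.1 ≠ pvDiffWitnessOut_make_time_set_from_hms_list_by_step.2
def Claim_exact_make_time_set_from_hms_list_by_step : Prop := ∀ (start_hms_list : List Int) (step : Int) (cycle : Int), Dom_make_time_set_from_hms_list_by_step start_hms_list step cycle → Pre_make_time_set_from_hms_list_by_step start_hms_list step cycle → D_make_time_set_from_hms_list_by_step start_hms_list step cycle → make_time_set_from_hms_list_by_step start_hms_list step cycle ≠ make_time_set_from_hms_list_by_step_alt start_hms_list step cycle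

-- ===== LEMMAS AND PROOFS =====

-- the (hour, minute) state after k iterations of A's loop
def pvIter (step hour minute : Int) : Nat → Int × Int
  | 0 => (hour, minute)
  | n + 1 =>
    let p := pvIter step hour minute n
    let t := p.2 + step
    let c := PySem.Int.floordiv t 60
    (PySem.Int.mod (if c > 0 then p.1 + c else p.1) 24, PySem.Int.mod t 60)

-- closed-form state of A's loop for k ≥ 1 (valid for 0 ≤ step)
def pvClosedA (step hour minute : Int) (k : Int) : Int × Int :=
  let c1 := PySem.Int.floordiv (minute + step) 60
  (PySem.Int.mod (hour + PySem.Int.floordiv (minute + k * step) 60 - min c1 0) 24,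
   PySem.Int.mod (minute + k * step) 60)

theorem pvIter_shift (step hour minute : Int) (k : Nat) :
    pvIter step hour minute (k + 1) =
      pvIter step (pvIter step hour minute 1).1 (pvIter step hour minute 1).2 k := by
  induction k with
  | zero => rfl
  | succ n ih => rw [pvIter, ih]; rfl

theorem pvFoldA (sec step : Int) (l : List Int) :
    ∀ (acc : List (List Int)) (h m : Int),
      l.foldl
        (fun (st : List (List Int) × Int × Int) _one =>
          let min1 := st.2.2 + step
          let over_min := PySem.Int.floordiv min1 60
          let min2 := PySem.Int.mod min1 60
          let hour1 := if over_min > 0 then st.2.1 + over_min else st.2.1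
          let hour2 := PySem.Int.mod hour1 24
          (st.1 ++ [[hour2, min2, sec]], hour2, min2))
        (acc, h, m)
      = (acc ++ (List.range l.length).map
          (fun j => [(pvIter step h m (j + 1)).1, (pvIter step h m (j + 1)).2, sec]),
         pvIter step h m l.length) := by
  induction l with
  | nil => intro acc h m; simp [pvIter]
  | cons x xs ih =>
    intro acc h m
    simp only [List.foldl_cons, List.length_cons]
    rw [ih]
    have h1 : pvIter step h m 1 =
        (PySem.Int.mod
            (if PySem.Int.floordiv (m + step) 60 > 0 then h + PySem.Int.floordiv (m + step) 60 else h) 24,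
         PySem.Int.mod (m + step) 60) := by
      simp [pvIter]
    have hs2 : ∀ j : Nat, pvIter step h m (j + 1) =
        pvIter step
          (PySem.Int.mod
            (if PySem.Int.floordiv (m + step) 60 > 0 then h + PySem.Int.floordiv (m + step) 60 else h) 24)
          (PySem.Int.mod (m + step) 60) j := by
      intro j
      rw [pvIter_shift step h m j, h1]
    rw [Prod.mk.injEq]
    refine ⟨?_, ?_⟩
    · rw [List.range_succ_eq_map]
      simp only [List.map_cons, List.map_map, Function.comp_def, hs2]
      simp [pvIter, List.append_assoc]
    · rw [hs2]

theorem pvIter_closed (step hour minute : Int) (hs : 0 ≤ step) (k : Nat) (hk : 1 ≤ k) :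
    pvIter step hour minute k = pvClosedA step hour minute (k : Int) := by
  have h60 : (0:Int) < 60 := by norm_num
  have h24 : (0:Int) < 24 := by norm_num
  induction k with
  | zero => omega
  | succ n ih =>
    by_cases hn : 1 ≤ n
    · have hstep := ih hn
      rw [pvIter, hstep]
      simp only [pvClosedA]
      simp only [PySem.Int.mod_eq_emod_of_pos h60, PySem.Int.mod_eq_emod_of_pos h24,
        PySem.Int.floordiv_eq_ediv_of_pos h60]
      push_cast
      rw [show minute + ((n : Int) + 1) * step = (minute + (n : Int) * step) + step from by ring]
      generalize minute + (n : Int) * step = x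
      generalize (minute + step) / 60 = c1
      rw [Prod.mk.injEq]
      refine ⟨?_, ?_⟩
      · split_ifs with hc <;> omega
      · omega
    · have hn0 : n = 0 := by omega
      subst hn0
      rw [pvIter]
      simp only [pvIter, pvClosedA]
      simp only [PySem.Int.mod_eq_emod_of_pos h60, PySem.Int.mod_eq_emod_of_pos h24,
        PySem.Int.floordiv_eq_ediv_of_pos h60]
      push_cast
      rw [one_mul]
      rw [Prod.mk.injEq]
      refine ⟨?_, ?_⟩
      · split_ifs <;> omega
      · rfl

-- within Pre_, outside D_, the two ports agree on every well-formed triple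
theorem pvMain (hour minute sec step cycle : Int) (hs : 0 ≤ step)
    (hnd : ¬ D_make_time_set_from_hms_list_by_step [hour, minute, sec] step cycle) :
    make_time_set_from_hms_list_by_step [hour, minute, sec] step cycle =
      make_time_set_from_hms_list_by_step_alt [hour, minute, sec] step cycle := by
  have h60 : (0:Int) < 60 := by norm_num
  unfold make_time_set_from_hms_list_by_step make_time_set_from_hms_list_by_step_alt
  simp only
  rw [pvFoldA sec step]
  rw [PySem.List.pyRange_one 0 cycle, PySem.List.pyRange_one 1 (cycle + 1)]
  simp only [List.length_map, List.length_range, List.map_map, Function.comp_def]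
  have hlen : (cycle + 1 - 1).toNat = (cycle - 0).toNat := by omega
  rw [hlen]
  set n := (cycle - 0).toNat with hn
  -- from ¬D_ : the dropped borrow min c1 0 is a multiple of 24 (or the tail is empty)
  unfold D_make_time_set_from_hms_list_by_step at hnd
  simp only [List.getD, List.getElem?_cons_succ, List.getElem?_cons_zero, Option.getD_some] at hnd
  by_cases hcy : 1 ≤ cycle
  · have hdvd : min (PySem.Int.floordiv (minute + step) 60) 0 % 24 = 0 := by
      by_cases hneg : minute + step < 0
      · have hmod : PySem.Int.mod (PySem.Int.floordiv (minute + step) 60) 24 = 0 := by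
          by_contra h; exact hnd ⟨hs, hcy, hneg, h⟩
        rw [PySem.Int.mod_eq_emod_of_pos (show (0:Int) < 24 by norm_num)] at hmod
        rw [PySem.Int.floordiv_eq_ediv_of_pos h60] at hmod ⊢
        omega
      · rw [PySem.Int.floordiv_eq_ediv_of_pos h60]
        omega
    congr 1
    apply List.map_congr_left
    intro j _
    rw [pvIter_closed step hour minute hs (j + 1) (by omega)]
    simp only [pvClosedA]
    have hcast : (1 + (j : Int)) = ((j + 1 : Nat) : Int) := by push_cast; ring
    rw [← hcast]
    have hkey : PySem.Int.mod (hour + PySem.Int.floordiv (minute + (1 + (j:Int)) * step) 60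
          - min (PySem.Int.floordiv (minute + step) 60) 0) 24
        = PySem.Int.mod (hour + PySem.Int.floordiv (minute + (1 + (j:Int)) * step) 60) 24 := by
      simp only [PySem.Int.mod_eq_emod_of_pos (show (0:Int) < 24 by norm_num)]
      generalize PySem.Int.floordiv (minute + (1 + (j:Int)) * step) 60 = F
      generalize min (PySem.Int.floordiv (minute + step) 60) 0 = c at hdvd
      omega
    rw [hkey]
  · have hn0 : n = 0 := by omega
    rw [hn0]
    simp

-- ===== VERDICT =====
theorem make_time_set_from_hms_list_by_step_spec : Claim_unchanged_make_time_set_from_hms_list_by_step := by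
  intro start_hms_list step cycle _hDom hPre hnd
  obtain ⟨hlen, hs⟩ := hPre
  match start_hms_list, hlen with
  | [hour, minute, sec], _ => exact pvMain hour minute sec step cycle hs hnd

theorem make_time_set_from_hms_list_by_step_changed : Claim_changed_make_time_set_from_hms_list_by_step := by
  unfold Claim_changed_make_time_set_from_hms_list_by_step; decide

theorem make_time_set_from_hms_list_by_step_tight : Claim_exact_make_time_set_from_hms_list_by_step := by
  intro start_hms_list step cycle _hDom hPre hD
  obtain ⟨hlen, hs⟩ := hPre
  match start_hms_list, hlen with
  | [hour, minute, sec], _ =>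
    obtain ⟨_, hcy, hneg, hmod⟩ := hD
    simp only [List.getD, List.getElem?_cons_succ, List.getElem?_cons_zero, Option.getD_some] at hneg hmod
    intro heq
    unfold make_time_set_from_hms_list_by_step make_time_set_from_hms_list_by_step_alt at heq
    simp only at heq
    rw [pvFoldA sec step] at heq
    rw [PySem.List.pyRange_one_cons (by omega : (1:Int) < cycle + 1)] at heq
    have hlenA : (PySem.List.pyRange 0 cycle 1).length = (cycle - 0).toNat := PySem.List.length_pyRange_one 0 cycle
    obtain ⟨n', hn'⟩ : ∃ n', (PySem.List.pyRange 0 cycle 1).length = n' + 1 := by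
      rw [hlenA]; exact ⟨(cycle - 0).toNat - 1, by omega⟩
    rw [hn', List.range_succ_eq_map] at heq
    -- compare the element at index 1 (A's first generated element vs B's)
    have hel := congrArg (fun l => l[1]?) heq
    simp only [List.map_cons, List.map_map, List.cons_append, List.nil_append,
      List.getElem?_cons_succ, List.getElem?_cons_zero, Option.some.injEq] at hel
    have hng : ¬ PySem.Int.floordiv (minute + step) 60 > 0 := by
      rw [PySem.Int.floordiv_eq_ediv_of_pos (show (0:Int) < 60 by norm_num)]
      omega
    have h1 : pvIter step hour minute (0 + 1) =
        (PySem.Int.mod hour 24, PySem.Int.mod (minute + step) 60) := by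
      simp only [pvIter]
      rw [if_neg hng]
    rw [h1] at hel
    simp only [one_mul] at hel
    have hh := congrArg (fun l => l[0]?) hel
    simp only [List.getElem?_cons_zero, Option.some.injEq] at hh
    simp only [PySem.Int.mod_eq_emod_of_pos (by norm_num : (0:Int) < 24)] at hh hmod
    generalize hc : PySem.Int.floordiv (minute + step) 60 = c1 at hh hmod
    omega
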